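-- pv_equiv track=rewrite | github.com/Furash/chordsong | core/engine.py | humanize_token
-- ===== SOURCE A (Python) =====
-- def humanize_token(token: str) -> str:
--     """Convert an internal AHK-style token to a more readable format for the user."""
--     # Mapping table for modifiers
--     mod_map = {
--         '^': 'Ctrl',
--         '!': 'Alt',
--         '+': 'Shift',
--         '#': 'Win'
--     }
--
--     # Process side indicators and modifiers
--     res = token
--     parts = []
--
--     # Loop to pull off potential <^ >! etc prefixes
--     while len(res) > 0:
--         side = ""
--         if res.startswith('<'):
--             # Left is default, show no prefix
--             side = ""
--             res = res[1:]
--         elif res.startswith('>'):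
--             side = "R"
--             res = res[1:]
--
--         if len(res) > 0 and res[0] in mod_map:
--             parts.append(f"{side}{mod_map[res[0]]}")
--             res = res[1:]
--         else:
--             # Reached the base key
--             # If we had a side indicator with no modifier, put it back or ignore
--             # but usually it's tied to one.
--             parts.append(res)
--             break
--
--     return "+".join(parts)
-- ===== SOURCE B (Python) =====
-- import re
--
-- def humanize_token(token: str) -> str:
--     """Convert an internal AHK-style token to a more readable format for the user."""
--     mod_map = {'^': 'Ctrl', '!': 'Alt', '+': 'Shift', '#': 'Win'}
--     run = re.match(r'(?:[<>]?[\^!+#])*', token).group(0)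
--     parts = [('R' if side == '>' else '') + mod_map[m]
--              for side, m in re.findall(r'([<>]?)([\^!+#])', run)]
--     rest = token[len(run):]
--     if rest:
--         if rest[0] in '<>':
--             rest = rest[1:]
--         parts.append(rest)
--     return '+'.join(parts)
-- ===== Notes on version B (the rewrite author's own statement) =====
-- stated objective: idiomatic
-- what changed: Replaces A's char-by-char while-loop that slices side/modifier prefixes off the string with a regex-based decomposition: match the leading modifier run, findall its (side, modifier) pairs to format the parts, then handle the remainder separately.
import Mathlib
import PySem

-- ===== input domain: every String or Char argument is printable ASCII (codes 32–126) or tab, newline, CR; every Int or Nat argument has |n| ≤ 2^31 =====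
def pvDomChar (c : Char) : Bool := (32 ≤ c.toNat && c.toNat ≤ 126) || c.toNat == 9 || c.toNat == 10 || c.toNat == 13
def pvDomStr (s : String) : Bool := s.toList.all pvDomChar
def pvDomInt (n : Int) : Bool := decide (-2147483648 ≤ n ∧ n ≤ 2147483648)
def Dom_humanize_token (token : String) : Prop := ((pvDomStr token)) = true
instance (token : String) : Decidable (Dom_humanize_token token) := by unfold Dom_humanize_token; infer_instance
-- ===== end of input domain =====

-- B replaces A's char-by-char slicing loop by a pattern-match-then-format decomposition
-- (grab the leading side+modifier run, format its pairs, then handle the remainder); objective: idiomatic.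

-- ===== PORT A =====
-- mod_map lookup (dict with constant string keys, ported as a direct match)
def pvModMap (c : Char) : Option String :=
  if c = '^' then some "Ctrl"
  else if c = '!' then some "Alt"
  else if c = '+' then some "Shift"
  else if c = '#' then some "Win"
  else none

-- A's while-loop over res with accumulator parts
def pvLoopA : List Char → List String → List String
  | [], parts => parts
  | c :: cs, parts =>
    if c = '<' ∨ c = '>' then
      -- side consumed (side = "R" iff '>')
      let side : String := if c = '>' then "R" else ""
      match cs with
      | m :: rest =>
        match pvModMap m with
        | some s => pvLoopA rest (parts ++ [side ++ s])
        | none => parts ++ [String.ofList cs]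
      | [] => parts ++ [String.ofList cs]
    else
      match pvModMap c with
      | some s => pvLoopA cs (parts ++ ["" ++ s])
      | none => parts ++ [String.ofList (c :: cs)]

def humanize_token (token : String) : String :=
  PySem.Str.join "+" (pvLoopA token.toList [])

-- ===== PORT B =====
-- re.findall on the leading run: list of ([<>]?, [\^!+#]) group pairs, plus the unmatched rest
-- (' ' stands for an empty side group; regex backtracking = side only taken when a modifier follows)
def pvGrabRun : List Char → List (Char × Char) × List Char
  | [] => ([], [])
  | c :: cs =>
    if c = '<' ∨ c = '>' then
      match cs with
      | m :: rest =>
        if (pvModMap m).isSome then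
          ((c, m) :: (pvGrabRun rest).1, (pvGrabRun rest).2)
        else ([], c :: cs)
      | [] => ([], c :: cs)
    else if (pvModMap c).isSome then
      ((' ', c) :: (pvGrabRun cs).1, (pvGrabRun cs).2)
    else ([], c :: cs)

-- the comprehension: ('R' if side=='>' else '') + mod_map[m]
def pvFmt (p : Char × Char) : String :=
  (if p.1 = '>' then "R" else "") ++ ((pvModMap p.2).getD "")

def humanize_token_alt (token : String) : String :=
  let g := pvGrabRun token.toList
  let parts := g.1.map pvFmt
  let parts :=
    match g.2 with
    | [] => parts
    | r :: rs => parts ++ [if r = '<' ∨ r = '>' then String.ofList rs else String.ofList (r :: rs)]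
  PySem.Str.join "+" parts

-- ===== PRECONDITION & SPEC =====
def Spec_humanize_token (token : String) (out : String) : Prop := out = humanize_token_alt token
instance (token : String) (out : String) : Decidable (Spec_humanize_token token out) := by unfold Spec_humanize_token; infer_instance

-- ===== CLAIM (what is proved, stated in full; the proofs are below) =====
def Claim_equal_humanize_token : Prop := ∀ (token : String), Dom_humanize_token token → Spec_humanize_token token (humanize_token token)

-- ===== LEMMAS AND PROOFS =====
def pvRestPart : List Char → List String
  | [] => []
  | r :: rs => [if r = '<' ∨ r = '>' then String.ofList rs else String.ofList (r :: rs)]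

theorem pvLoopA_eq : ∀ (l : List Char) (parts : List String),
    pvLoopA l parts = parts ++ ((pvGrabRun l).1.map pvFmt ++ pvRestPart (pvGrabRun l).2)
  | [], parts => by simp [pvLoopA, pvGrabRun, pvRestPart]
  | [c], parts => by
      by_cases h : c = '<' ∨ c = '>'
      · simp [pvLoopA, pvGrabRun, pvRestPart, h]
      · cases hm : pvModMap c with
        | some s => simp [pvLoopA, pvGrabRun, pvRestPart, h, hm, pvFmt]
        | none => simp [pvLoopA, pvGrabRun, pvRestPart, h, hm]
  | c :: m :: rest, parts => by
      by_cases h : c = '<' ∨ c = '>'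
      · cases hm : pvModMap m with
        | some s =>
            have ih := pvLoopA_eq rest (parts ++ [(if c = '>' then "R" else "") ++ s])
            simp [pvLoopA, pvGrabRun, h, hm, pvFmt, ih]
        | none => simp [pvLoopA, pvGrabRun, pvRestPart, h, hm]
      · cases hm : pvModMap c with
        | some s =>
            have hstep : pvLoopA (c :: m :: rest) parts = pvLoopA (m :: rest) (parts ++ ["" ++ s]) := by
              conv_lhs => rw [pvLoopA]
              simp [h, hm]
            rw [hstep, pvLoopA_eq (m :: rest) (parts ++ ["" ++ s])]
            simp [pvGrabRun, h, hm, pvFmt]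
        | none => simp [pvLoopA, pvGrabRun, pvRestPart, h, hm]
termination_by l _ => l.length

-- ===== VERDICT (by name: the statement is the Claim_ definition above) =====
theorem humanize_token_spec : Claim_equal_humanize_token := by
  intro token _
  unfold Spec_humanize_token humanize_token humanize_token_alt
  rw [pvLoopA_eq]
  cases hg : (pvGrabRun token.toList).2 <;> simp [pvRestPart, hg]
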